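-- pv_equiv track=rewrite | github.com/BradleyBartelt/P2__Waves | views/colin/app.py | translateBy
-- ===== SOURCE A (Python) =====
-- inital_coords = [200, 10, 250, 190, 160, 210]
--
-- def translateBy(res, valuex, valuey, state):
--     if state == 'reset':
--         res = inital_coords
--     else:
--         for i in range(len(res)):
--             if i % 2 == 0:
--                 # if the value is in 0,2,4,6,8 place add the x displacement
--                 x_coord = int(res[i])
--                 x_displacement = int(valuex)
--                 res[i] = x_coord + x_displacement
--             else:
--                 # if the value is in 1,3,5,7,9 place add the y displacement
--                 y_coord = int(res[i])
--                 y_displacement = int(valuey)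
--                 res[i] = y_coord + y_displacement
--     return res
-- ===== SOURCE B (Python) =====
-- inital_coords = [200, 10, 250, 190, 160, 210]
--
-- def translateBy(res, valuex, valuey, state):
--     if state == 'reset':
--         return inital_coords
--     res[0::2] = [int(v) + int(valuex) for v in res[0::2]]
--     res[1::2] = [int(v) + int(valuey) for v in res[1::2]]
--     return res
-- ===== Notes on version B (the rewrite author's own statement) =====
-- stated objective: simpler
-- what changed: Replaces the index loop with parity branch by two strided-slice assignments: even positions get +valuex, odd positions get +valuey, written back in place.
import Mathlib
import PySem

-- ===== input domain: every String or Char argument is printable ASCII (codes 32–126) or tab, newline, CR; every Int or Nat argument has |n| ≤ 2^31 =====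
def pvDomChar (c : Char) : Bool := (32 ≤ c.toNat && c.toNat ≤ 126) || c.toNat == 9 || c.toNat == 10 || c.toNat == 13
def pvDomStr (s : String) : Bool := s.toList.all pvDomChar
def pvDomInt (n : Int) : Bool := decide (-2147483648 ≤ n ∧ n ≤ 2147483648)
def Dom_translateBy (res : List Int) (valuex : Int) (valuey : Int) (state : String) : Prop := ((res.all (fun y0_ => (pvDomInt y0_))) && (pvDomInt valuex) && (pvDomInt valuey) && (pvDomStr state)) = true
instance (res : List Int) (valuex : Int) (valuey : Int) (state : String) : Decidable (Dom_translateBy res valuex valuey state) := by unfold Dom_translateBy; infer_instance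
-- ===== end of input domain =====

-- B replaces A's parity-branching index loop with two strided-slice updates (even positions +valuex,
-- odd positions +valuey) interleaved back; equivalence is about the return value (both mutate res identically).


-- ===== PORT A =====
-- the module-level constant shared by both versions
def initalCoords : List Int := [200, 10, 250, 190, 160, 210]

-- A's loop: for i in range(len(res)): res[i] = res[i] + (valuex if i%2==0 else valuey),
-- carried as structural recursion with the running index i
def loopA (valuex valuey : Int) (i : Nat) : List Int → List Int
  | [] => []
  | x :: xs =>
      (if i % 2 == 0 then x + valuex else x + valuey) :: loopA valuex valuey (i + 1) xs

def translateBy (res : List Int) (valuex : Int) (valuey : Int) (state : String) : List Int :=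
  if state == "reset" then initalCoords
  else loopA valuex valuey 0 res

-- ===== PORT B =====
-- res[0::2] (elements at even positions); res[1::2] is stride2 res.tail
def stride2 : List Int → List Int
  | [] => []
  | [x] => [x]
  | x :: _ :: xs => x :: stride2 xs

-- slice assignment res[0::2] = …, res[1::2] = … : write the two strided lists back
def interleave : List Int → List Int → List Int
  | [], ys => ys
  | x :: xs, ys => x :: interleave ys xs
termination_by xs ys => xs.length + ys.length
decreasing_by simp; omega

def translateBy_alt (res : List Int) (valuex : Int) (valuey : Int) (state : String) : List Int :=
  if state == "reset" then initalCoords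
  else interleave ((stride2 res).map (· + valuex)) ((stride2 res.tail).map (· + valuey))

-- ===== PRECONDITION & SPEC =====
def Spec_translateBy (res : List Int) (valuex : Int) (valuey : Int) (state : String) (out : List Int) : Prop := out = translateBy_alt res valuex valuey state
instance (res : List Int) (valuex : Int) (valuey : Int) (state : String) (out : List Int) : Decidable (Spec_translateBy res valuex valuey state out) := by unfold Spec_translateBy; infer_instance

-- ===== CLAIM (what is proved, stated in full; the proofs are below) =====
def Claim_equal_translateBy : Prop := ∀ (res : List Int) (valuex : Int) (valuey : Int) (state : String), Dom_translateBy res valuex valuey state → Spec_translateBy res valuex valuey state (translateBy res valuex valuey state)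

-- ===== LEMMAS AND PROOFS =====
theorem loopA_parity (valuex valuey : Int) (i : Nat) (l : List Int) :
    loopA valuex valuey (i + 2) l = loopA valuex valuey i l := by
  induction l generalizing i with
  | nil => rfl
  | cons x xs ih =>
      simp [loopA, Nat.add_mod_right, ih]

theorem stride2_cons_tail (y : Int) (xs : List Int) :
    stride2 (y :: xs) = y :: stride2 xs.tail := by
  cases xs <;> rfl

theorem loopA_eq_interleave (valuex valuey : Int) :
    ∀ l : List Int, loopA valuex valuey 0 l =
      interleave ((stride2 l).map (· + valuex)) ((stride2 l.tail).map (· + valuey))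
  | [] => by simp [loopA, stride2, interleave]
  | [x] => by simp [loopA, stride2, interleave]
  | x :: y :: xs => by
      have h2 : loopA valuex valuey 2 xs = loopA valuex valuey 0 xs := loopA_parity valuex valuey 0 xs
      simp [loopA, stride2, stride2_cons_tail, interleave, h2,  -- keep interleave for its WF equations
        loopA_eq_interleave valuex valuey xs]

-- ===== VERDICT (by name: the statement is the Claim_ definition above) =====
theorem translateBy_spec : Claim_equal_translateBy := by
  intro res valuex valuey state _
  unfold Spec_translateBy translateBy translateBy_alt
  by_cases h : state == "reset"
  · simp [h]
  · simp [h, loopA_eq_interleave]
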